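-- pv_equiv track=rewrite | github.com/ChanduSharma/interviewbit_solutions | Arrays/find_permutation.py | findPerm
-- ===== SOURCE A (Python) =====
-- import collections
--
-- def findPerm(A, B):
--     choices = collections.deque(range(1, B + 1))
--
--     next_is_smaller = lambda c : c == 'D'
--
--     next_is_greater = lambda c : c == 'I'
--     ans = []
--     for condition in A:
--         if next_is_smaller(condition):
--             ans.append(choices.pop())
--         elif next_is_greater(condition):
--             ans.append(choices.popleft())
--
--     ans.append(choices.pop())
--     return ans
-- ===== SOURCE B (Python) =====
-- def findPerm(A, B):
--     # Staged positional construction: the k-th 'I' slot (0-based) gets value k+1,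
--     # the k-th 'D' slot gets value B-k, and the trailing final pop acts as one more 'D'.
--     s = [c for c in A if c == 'I' or c == 'D'] + ['D']
--     Is = [i for i, c in enumerate(s) if c == 'I']
--     Ds = [i for i, c in enumerate(s) if c == 'D']
--     res = [0] * len(s)
--     for k, i in enumerate(Is):
--         res[i] = k + 1
--     for k, i in enumerate(Ds):
--         res[i] = B - k
--     return res
-- ===== Notes on version B (the rewrite author's own statement) =====
-- stated objective: faster
-- what changed: Replaces A's online two-ended deque consumption with a staged positional construction: filter the constraint string, compute the index lists of the 'I' and 'D' slots (the final pop acting as one trailing 'D'), and fill a preallocated result array in two write passes (k-th I-slot gets k+1, k-th D-slot gets B-k), so no deque of range(1,B+1) is ever built or popped.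
import Mathlib
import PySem

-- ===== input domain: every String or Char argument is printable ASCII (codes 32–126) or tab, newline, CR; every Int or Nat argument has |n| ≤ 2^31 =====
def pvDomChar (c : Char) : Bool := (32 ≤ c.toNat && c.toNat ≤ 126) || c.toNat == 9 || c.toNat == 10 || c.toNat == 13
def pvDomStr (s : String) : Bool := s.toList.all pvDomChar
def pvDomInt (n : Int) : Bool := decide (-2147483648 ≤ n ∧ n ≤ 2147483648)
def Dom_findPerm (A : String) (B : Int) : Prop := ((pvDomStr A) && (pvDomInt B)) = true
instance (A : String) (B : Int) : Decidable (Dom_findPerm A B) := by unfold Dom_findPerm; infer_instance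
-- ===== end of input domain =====

-- B replaces A's online two-ended deque popping by a staged positional construction
-- (filter, index lists, two write passes into a preallocated array); measured faster (no deque built/popped).

-- ===== PORT A =====
-- one loop step of A: 'D' pops from the right of the deque, 'I' from the left
-- (on an empty deque Python raises IndexError — excluded by Pre_; the port leaves the state unchanged there)
def findPermStepA (st : List Int × List Int) (c : Char) : List Int × List Int :=
  if c = 'D' then
    match st.1.getLast? with
    | some v => (st.1.dropLast, st.2 ++ [v])
    | none => st
  else if c = 'I' then
    match st.1 with
    | v :: rest => (rest, st.2 ++ [v])
    | [] => st
  else st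

def findPerm (A : String) (B : Int) : List Int :=
  let choices : List Int := PySem.List.pyRange 1 (B + 1) 1
  let st := A.toList.foldl findPermStepA (choices, [])
  st.2 ++ [st.1.getLast?.getD 0]   -- final choices.pop(); raises on empty deque (excluded by Pre_)

-- ===== PORT B =====
-- Source B: s = filtered chars + ['D']; Is/Ds = index lists; res = [0]*len(s);
-- then two write passes: k-th I-slot gets k+1, k-th D-slot gets B-k.
def findPerm_alt (A : String) (B : Int) : List Int :=
  let s : List Char := (A.toList.filter fun c => c == 'I' || c == 'D') ++ ['D']
  let Is : List Int := ((PySem.List.enumerate s 0).filter fun p => p.2 == 'I').map Prod.fst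
  let Ds : List Int := ((PySem.List.enumerate s 0).filter fun p => p.2 == 'D').map Prod.fst
  let res0 : List Int := List.replicate s.length 0
  let res1 := (PySem.List.enumerate Is 0).foldl (fun r p => PySem.List.pySetD r p.2 (p.1 + 1)) res0
  let res2 := (PySem.List.enumerate Ds 0).foldl (fun r p => PySem.List.pySetD r p.2 (B - p.1)) res1
  res2

-- ===== PRECONDITION & SPEC =====
-- number of 'I'/'D' characters in A (each consumes one element of the deque; the final pop needs one more)
def findPermCountID (A : String) : Int :=
  (A.toList.countP (fun c => c == 'D' || c == 'I') : Int)

-- Pre_ excludes exactly the inputs on which the deque runs empty (Python raises IndexError there)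
def Pre_findPerm (A : String) (B : Int) : Prop := findPermCountID A < B
instance (A : String) (B : Int) : Decidable (Pre_findPerm A B) := by unfold Pre_findPerm; infer_instance

def pvWitness_findPerm : String × Int := ("IDID", 7)

def Spec_findPerm (A : String) (B : Int) (out : List Int) : Prop := out = findPerm_alt A B
instance (A : String) (B : Int) (out : List Int) : Decidable (Spec_findPerm A B out) := by unfold Spec_findPerm; infer_instance

-- ===== CLAIM (what is proved, stated in full; the proofs are below) =====
def Claim_equal_findPerm : Prop := ∀ (A : String) (B : Int), Dom_findPerm A B → Pre_findPerm A B → Spec_findPerm A B (findPerm A B)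

-- ===== LEMMAS AND PROOFS =====

-- common reference value: the sequence of values the loop emits, by structural recursion
def pvBuild : List Char → Int → Int → List Int
  | [], _, _ => []
  | c :: t, low, high =>
    if c = 'D' then high :: pvBuild t low (high - 1)
    else if c = 'I' then low :: pvBuild t (low + 1) high
    else pvBuild t low high

def pvCntI (cs : List Char) : Int := (cs.countP (fun c => c == 'I') : Int)
def pvCntD (cs : List Char) : Int := (cs.countP (fun c => c == 'D') : Int)

theorem pvCnt_split (cs : List Char) :
    (cs.countP (fun c => c == 'D' || c == 'I') : Int) = pvCntI cs + pvCntD cs := by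
  induction cs with
  | nil => simp [pvCntI, pvCntD]
  | cons c t ih =>
    simp only [pvCntI, pvCntD, List.countP_cons] at *
    by_cases hD : c = 'D' <;> by_cases hI : c = 'I' <;>
      simp [hD, hI] at * <;> push_cast <;> omega

theorem pvCntI_nonneg (cs : List Char) : 0 ≤ pvCntI cs := Int.natCast_nonneg _
theorem pvCntD_nonneg (cs : List Char) : 0 ≤ pvCntD cs := Int.natCast_nonneg _

theorem pvCntI_cons (c : Char) (t : List Char) :
    pvCntI (c :: t) = pvCntI t + (if c = 'I' then 1 else 0) := by
  simp only [pvCntI, List.countP_cons]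
  by_cases h : c = 'I' <;> simp [h]

theorem pvCntD_cons (c : Char) (t : List Char) :
    pvCntD (c :: t) = pvCntD t + (if c = 'D' then 1 else 0) := by
  simp only [pvCntD, List.countP_cons]
  by_cases h : c = 'D' <;> simp [h]

-- ===== A-side: the deque loop emits pvBuild =====
theorem findPerm_loopA (cs : List Char) : ∀ (low high : Int) (ans : List Int),
    (cs.countP (fun c => c == 'D' || c == 'I') : Int) ≤ high - low →
    cs.foldl findPermStepA (PySem.List.pyRange low (high + 1) 1, ans)
      = (PySem.List.pyRange (low + pvCntI cs) (high - pvCntD cs + 1) 1,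
         ans ++ pvBuild cs low high) := by
  induction cs with
  | nil => intro low high ans h; simp [List.foldl, pvBuild, pvCntI, pvCntD]
  | cons c rest ih =>
    intro low high ans h
    have hnn : (0 : Int) ≤ (rest.countP (fun c => c == 'D' || c == 'I') : Int) :=
      Int.natCast_nonneg _
    by_cases hD : c = 'D'
    · have hcnt : ((c :: rest).countP (fun c => c == 'D' || c == 'I') : Int)
          = (rest.countP (fun c => c == 'D' || c == 'I') : Int) + 1 := by
        simp [hD]
      have hlh : low ≤ high := by omega
      have hsnoc : PySem.List.pyRange low (high + 1) 1
          = PySem.List.pyRange low high 1 ++ [high] :=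
        PySem.List.pyRange_one_succ_right hlh
      have hstepA : findPermStepA (PySem.List.pyRange low (high + 1) 1, ans) c
          = (PySem.List.pyRange low high 1, ans ++ [high]) := by
        simp only [findPermStepA, hD, hsnoc]
        simp
      have hih := ih low (high - 1) (ans ++ [high]) (by omega)
      rw [show high - 1 + 1 = high from by omega] at hih
      have eI : pvCntI ('D' :: rest) = pvCntI rest := by rw [pvCntI_cons]; simp
      have eD : pvCntD ('D' :: rest) = pvCntD rest + 1 := by rw [pvCntD_cons]; simp
      have erng : high - 1 - pvCntD rest + 1 = high - pvCntD ('D' :: rest) + 1 := by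
        rw [eD]; ring
      subst hD
      rw [List.foldl_cons, hstepA, hih]
      simp [pvBuild, eI, eD, erng]
    · by_cases hI : c = 'I'
      · have hcnt : ((c :: rest).countP (fun c => c == 'D' || c == 'I') : Int)
            = (rest.countP (fun c => c == 'D' || c == 'I') : Int) + 1 := by
          simp [hI]
        have hlh : low < high + 1 := by omega
        have hcons : PySem.List.pyRange low (high + 1) 1
            = low :: PySem.List.pyRange (low + 1) (high + 1) 1 :=
          PySem.List.pyRange_one_cons hlh
        have hstepA : findPermStepA (PySem.List.pyRange low (high + 1) 1, ans) c
            = (PySem.List.pyRange (low + 1) (high + 1) 1, ans ++ [low]) := by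
          simp [findPermStepA, hI, hcons]
        have hih := ih (low + 1) high (ans ++ [low]) (by omega)
        have eI : pvCntI ('I' :: rest) = pvCntI rest + 1 := by rw [pvCntI_cons]; simp
        have eD : pvCntD ('I' :: rest) = pvCntD rest := by rw [pvCntD_cons]; simp
        have erng : low + 1 + pvCntI rest = low + pvCntI ('I' :: rest) := by
          rw [eI]; ring
        subst hI
        rw [List.foldl_cons, hstepA, hih]
        simp [pvBuild, eI, eD, erng]
      · have hcnt : ((c :: rest).countP (fun c => c == 'D' || c == 'I') : Int)
            = (rest.countP (fun c => c == 'D' || c == 'I') : Int) := by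
          simp [hD, hI]
        have hstepA : findPermStepA (PySem.List.pyRange low (high + 1) 1, ans) c
            = (PySem.List.pyRange low (high + 1) 1, ans) := by
          simp [findPermStepA, hD, hI]
        have hih := ih low high ans (by omega)
        have eI : pvCntI (c :: rest) = pvCntI rest := by rw [pvCntI_cons]; simp [hI]
        have eD : pvCntD (c :: rest) = pvCntD rest := by rw [pvCntD_cons]; simp [hD]
        rw [List.foldl_cons, hstepA, hih]
        simp [pvBuild, if_neg hD, if_neg hI, eI, eD]


theorem pvSetD_append (r : List Int) (x v : Int) (i : Int) (h0 : 0 ≤ i) (h : i < (r.length : Int)) :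
    PySem.List.pySetD (r ++ [x]) i v = PySem.List.pySetD r i v ++ [x] := by
  rw [PySem.List.pySetD_of_nonneg _ _ h0, PySem.List.pySetD_of_nonneg _ _ h0, List.set_append]
  have : i.toNat < r.length := by omega
  simp [this]

theorem pvSetD_last (r : List Int) (x v : Int) :
    PySem.List.pySetD (r ++ [x]) (r.length : Int) v = r ++ [v] := by
  rw [PySem.List.pySetD_of_nonneg _ _ (by positivity), List.set_append]
  simp

theorem pvEnum_snoc {α : Type} (t : List α) (c : α) : PySem.List.enumerate (t ++ [c]) 0
    = PySem.List.enumerate t 0 ++ [((t.length : Int), c)] := by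
  rw [PySem.List.enumerate_append]
  simp [PySem.List.enumerate_cons, PySem.List.enumerate_nil]

theorem pvEnum_bound {α : Type} (p : Int × α) (s : List α) (st : Int)
    (h : p ∈ PySem.List.enumerate s st) : st ≤ p.1 ∧ p.1 < st + s.length := by
  rw [PySem.List.mem_enumerate_iff] at h
  obtain ⟨k, hk, rfl⟩ := h
  constructor <;> simp <;> omega

theorem pvEnum_snd_mem {α : Type} (p : Int × α) (s : List α) (st : Int)
    (h : p ∈ PySem.List.enumerate s st) : p.2 ∈ s := by
  rw [PySem.List.mem_enumerate_iff] at h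
  obtain ⟨k, hk, rfl⟩ := h
  simp

theorem pvFold_len (f : Int × Int → Int) (ps : List (Int × Int)) : ∀ (r : List Int),
    (ps.foldl (fun r p => PySem.List.pySetD r p.2 (f p)) r).length = r.length := by
  induction ps with
  | nil => intro r; rfl
  | cons p t ih => intro r; rw [List.foldl_cons, ih, PySem.List.length_pySetD]

theorem pvFold_append (f : Int × Int → Int) (ps : List (Int × Int)) : ∀ (r : List Int) (x : Int),
    (∀ p ∈ ps, 0 ≤ p.2 ∧ p.2 < (r.length : Int)) →
    ps.foldl (fun r p => PySem.List.pySetD r p.2 (f p)) (r ++ [x])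
      = ps.foldl (fun r p => PySem.List.pySetD r p.2 (f p)) r ++ [x] := by
  induction ps with
  | nil => intro r x _; rfl
  | cons p t ih =>
    intro r x hb
    rw [List.foldl_cons, List.foldl_cons,
      pvSetD_append r x (f p) p.2 (hb p (by simp)).1 (hb p (by simp)).2]
    exact ih _ x (fun q hq => by
      rw [PySem.List.length_pySetD]; exact hb q (by simp [hq]))

theorem pvLen_filter_enum (P : Char → Bool) (s : List Char) : ∀ st,
    ((PySem.List.enumerate s st).filter (fun p => P p.2)).length = s.countP P := by
  induction s with
  | nil => intro st; simp [PySem.List.enumerate_nil]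
  | cons c t ih =>
    intro st
    by_cases h : P c <;>
      simp [PySem.List.enumerate_cons, List.filter_cons, h, List.countP_cons, ih]

theorem pvIdx_bound (P : Int × Char → Bool) (s : List Char) :
    ∀ i ∈ ((PySem.List.enumerate s 0).filter P).map Prod.fst, 0 ≤ i ∧ i < (s.length : Int) := by
  intro i hi
  obtain ⟨p, hp, rfl⟩ := List.mem_map.mp hi
  have := pvEnum_bound p s 0 (List.mem_filter.mp hp).1
  omega

theorem pvBuild_filter (cs : List Char) : ∀ low high,
    pvBuild (cs.filter fun c => c == 'I' || c == 'D') low high = pvBuild cs low high := by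
  induction cs with
  | nil => intro low high; simp
  | cons c t ih =>
    intro low high
    by_cases hD : c = 'D'
    · simp [hD, pvBuild, ih]
    · by_cases hI : c = 'I'
      · simp [hI, pvBuild, ih]
      · simp [pvBuild, List.filter_cons, hD, hI, ih]

theorem pvCntD_filter (cs : List Char) :
    pvCntD (cs.filter fun c => c == 'I' || c == 'D') = pvCntD cs := by
  induction cs with
  | nil => rfl
  | cons c t ih =>
    by_cases hD : c = 'D'
    · simp [hD, pvCntD_cons, ih]
    · by_cases hI : c = 'I'
      · simp [hI, List.filter_cons, pvCntD_cons, ih, hD]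
      · simp [List.filter_cons, hD, hI, pvCntD_cons, ih]

theorem pvBuild_snoc_I (t : List Char) : ∀ low high,
    pvBuild (t ++ ['I']) low high = pvBuild t low high ++ [low + pvCntI t] := by
  induction t with
  | nil => intro low high; simp [pvBuild, pvCntI]
  | cons d t ih =>
    intro low high
    have eD : pvCntI ('D' :: t) = pvCntI t := by rw [pvCntI_cons]; simp
    have eI : pvCntI ('I' :: t) = pvCntI t + 1 := by rw [pvCntI_cons]; simp
    by_cases hD : d = 'D'
    · simp [hD, pvBuild, ih, eD]
    · by_cases hI : d = 'I'
      · simp only [hI, List.cons_append, pvBuild, if_neg (by decide : ¬('I':Char) = 'D'),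
          if_pos rfl, ih, eI]
        simp; omega
      · have e : pvCntI (d :: t) = pvCntI t := by rw [pvCntI_cons]; simp [hI]
        simp [pvBuild, hD, hI, ih, e]

theorem pvBuild_snoc_D (t : List Char) : ∀ low high,
    pvBuild (t ++ ['D']) low high = pvBuild t low high ++ [high - pvCntD t] := by
  induction t with
  | nil => intro low high; simp [pvBuild, pvCntD]
  | cons d t ih =>
    intro low high
    have eD : pvCntD ('D' :: t) = pvCntD t + 1 := by rw [pvCntD_cons]; simp
    have eI : pvCntD ('I' :: t) = pvCntD t := by rw [pvCntD_cons]; simp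
    by_cases hD : d = 'D'
    · simp only [hD, List.cons_append, pvBuild, if_pos rfl, ih, eD]
      simp; omega
    · by_cases hI : d = 'I'
      · simp [hI, pvBuild, ih, eI]
      · have e : pvCntD (d :: t) = pvCntD t := by rw [pvCntD_cons]; simp [hD]
        simp [pvBuild, hD, hI, ih, e]

-- ===== B-side: the positional writes emit pvBuild =====
theorem findPerm_altB (s : List Char) (B : Int) (hall : ∀ c ∈ s, c = 'I' ∨ c = 'D') :
    (PySem.List.enumerate (((PySem.List.enumerate s 0).filter fun p => p.2 == 'D').map Prod.fst) 0).foldl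
        (fun r p => PySem.List.pySetD r p.2 (B - p.1))
      ((PySem.List.enumerate (((PySem.List.enumerate s 0).filter fun p => p.2 == 'I').map Prod.fst) 0).foldl
        (fun r p => PySem.List.pySetD r p.2 (p.1 + 1))
        (List.replicate s.length 0))
      = pvBuild s 1 B := by
  revert hall
  induction s using List.reverseRecOn with
  | nil =>
    intro _
    simp [PySem.List.enumerate_nil, pvBuild]
  | append_singleton t c ih =>
    intro hall
    have hallt : ∀ d ∈ t, d = 'I' ∨ d = 'D' := fun d hd => hall d (by simp [hd])
    have hc : c = 'I' ∨ c = 'D' := hall c (by simp)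
    have hboundI : ∀ p ∈ PySem.List.enumerate
        (((PySem.List.enumerate t 0).filter fun p => p.2 == 'I').map Prod.fst) 0,
        0 ≤ p.2 ∧ p.2 < ((List.replicate t.length (0:Int)).length : Int) := by
      intro p hp
      have hm := pvEnum_snd_mem p _ 0 hp
      have := pvIdx_bound (fun p => p.2 == 'I') t p.2 hm
      simpa using this
    have hlenI : (((PySem.List.enumerate t 0).filter fun p => p.2 == 'I').map Prod.fst).length
        = t.countP (fun c => c == 'I') := by
      rw [List.length_map]; exact pvLen_filter_enum (fun c => c == 'I') t 0
    have hlenD : (((PySem.List.enumerate t 0).filter fun p => p.2 == 'D').map Prod.fst).length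
        = t.countP (fun c => c == 'D') := by
      rw [List.length_map]; exact pvLen_filter_enum (fun c => c == 'D') t 0
    -- the first pass over t's I-indices, on the un-extended base
    have hR1len : ((PySem.List.enumerate
        (((PySem.List.enumerate t 0).filter fun p => p.2 == 'I').map Prod.fst) 0).foldl
          (fun r p => PySem.List.pySetD r p.2 (p.1 + 1))
          (List.replicate t.length 0)).length = t.length := by
      rw [pvFold_len (fun p => p.1 + 1)]; simp
    rcases hc with hcI | hcD
    · subst hcI
      rw [pvEnum_snoc t 'I']
      rw [show ((PySem.List.enumerate t 0 ++ [((t.length : Int), 'I')]).filter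
            fun p => p.2 == 'I') = ((PySem.List.enumerate t 0).filter fun p => p.2 == 'I')
            ++ [((t.length : Int), 'I')] by simp [List.filter_append]]
      rw [show ((PySem.List.enumerate t 0 ++ [((t.length : Int), 'I')]).filter
            fun p => p.2 == 'D') = ((PySem.List.enumerate t 0).filter fun p => p.2 == 'D')
            by simp [List.filter_append]]
      rw [List.map_append]
      rw [show (List.map Prod.fst [((t.length : Int), 'I')]) = [(t.length : Int)] from rfl]
      rw [pvEnum_snoc]
      rw [show (t ++ ['I']).length = t.length + 1 by simp]
      rw [List.replicate_succ']
      rw [List.foldl_append]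
      rw [pvFold_append (fun p => p.1 + 1) _ _ _ hboundI]
      rw [List.foldl_cons, List.foldl_nil]
      -- the single write at the fresh last index
      have hlast := pvSetD_last ((PySem.List.enumerate
          (((PySem.List.enumerate t 0).filter fun p => p.2 == 'I').map Prod.fst) 0).foldl
            (fun r p => PySem.List.pySetD r p.2 (p.1 + 1))
            (List.replicate t.length 0)) 0
          ((((PySem.List.enumerate t 0).filter fun p => p.2 == 'I').map Prod.fst).length + 1)
      rw [hR1len] at hlast
      rw [hlast]
      rw [pvFold_append (fun p => B - p.1) _ _ _ (by
        intro p hp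
        have hm := pvEnum_snd_mem p _ 0 hp
        have := pvIdx_bound (fun p => p.2 == 'D') t p.2 hm
        rw [hR1len]
        simpa using this)]
      rw [ih hallt]
      rw [pvBuild_snoc_I]
      rw [hlenI]
      have : ((t.countP (fun c => c == 'I') : Int)) + 1 = 1 + pvCntI t := by
        simp [pvCntI]; omega
      rw [this]
    · subst hcD
      rw [pvEnum_snoc t 'D']
      rw [show ((PySem.List.enumerate t 0 ++ [((t.length : Int), 'D')]).filter
            fun p => p.2 == 'I') = ((PySem.List.enumerate t 0).filter fun p => p.2 == 'I')
            by simp [List.filter_append]]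
      rw [show ((PySem.List.enumerate t 0 ++ [((t.length : Int), 'D')]).filter
            fun p => p.2 == 'D') = ((PySem.List.enumerate t 0).filter fun p => p.2 == 'D')
            ++ [((t.length : Int), 'D')] by simp [List.filter_append]]
      rw [List.map_append]
      rw [show (List.map Prod.fst [((t.length : Int), 'D')]) = [(t.length : Int)] from rfl]
      rw [pvEnum_snoc]
      rw [show (t ++ ['D']).length = t.length + 1 by simp]
      rw [List.replicate_succ']
      rw [pvFold_append (fun p => p.1 + 1) _ _ _ hboundI]
      rw [List.foldl_append]
      rw [pvFold_append (fun p => B - p.1) _ _ _ (by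
        intro p hp
        have hm := pvEnum_snd_mem p _ 0 hp
        have := pvIdx_bound (fun p => p.2 == 'D') t p.2 hm
        rw [hR1len]
        simpa using this)]
      rw [List.foldl_cons, List.foldl_nil]
      -- the single write at the fresh last index
      have hR2len : ((PySem.List.enumerate
          (((PySem.List.enumerate t 0).filter fun p => p.2 == 'D').map Prod.fst) 0).foldl
            (fun r p => PySem.List.pySetD r p.2 (B - p.1))
            ((PySem.List.enumerate
              (((PySem.List.enumerate t 0).filter fun p => p.2 == 'I').map Prod.fst) 0).foldl
              (fun r p => PySem.List.pySetD r p.2 (p.1 + 1))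
              (List.replicate t.length 0))).length = t.length := by
        rw [pvFold_len (fun p => B - p.1)]; exact hR1len
      have hlast := pvSetD_last ((PySem.List.enumerate
          (((PySem.List.enumerate t 0).filter fun p => p.2 == 'D').map Prod.fst) 0).foldl
            (fun r p => PySem.List.pySetD r p.2 (B - p.1))
            ((PySem.List.enumerate
              (((PySem.List.enumerate t 0).filter fun p => p.2 == 'I').map Prod.fst) 0).foldl
              (fun r p => PySem.List.pySetD r p.2 (p.1 + 1))
              (List.replicate t.length 0))) 0
          (B - (((PySem.List.enumerate t 0).filter fun p => p.2 == 'D').map Prod.fst).length)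
      rw [hR2len] at hlast
      rw [hlast]
      rw [ih hallt]
      rw [pvBuild_snoc_D]
      rw [hlenD]
      have : B - ((t.countP (fun c => c == 'D') : Int)) = B - pvCntD t := by
        simp [pvCntD]
      rw [this]



-- ===== VERDICT (by name: the statement is the Claim_ definition above) =====
theorem findPerm_spec : Claim_equal_findPerm := by
  intro A B _ hpre
  have hcnt : (A.toList.countP (fun c => c == 'D' || c == 'I') : Int) < B := hpre
  have hsplit := pvCnt_split A.toList
  have hnnI := pvCntI_nonneg A.toList
  have hnnD := pvCntD_nonneg A.toList
  have h1 := findPerm_loopA A.toList 1 B [] (by omega)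
  have hle : 1 + pvCntI A.toList ≤ B - pvCntD A.toList := by omega
  have hall : ∀ c ∈ (A.toList.filter fun c => c == 'I' || c == 'D') ++ ['D'],
      c = 'I' ∨ c = 'D' := by
    intro c hc
    rcases List.mem_append.mp hc with h | h
    · have := (List.mem_filter.mp h).2
      simpa using this
    · right; simpa using h
  have hB := findPerm_altB ((A.toList.filter fun c => c == 'I' || c == 'D') ++ ['D']) B hall
  unfold Spec_findPerm findPerm findPerm_alt
  simp only []
  rw [h1, hB, pvBuild_snoc_D, pvBuild_filter, pvCntD_filter]
  rw [PySem.List.pyRange_one_succ_right hle]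
  simp
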